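-- pv_equiv track=rewrite | github.com/TirthPShah/PDEU-Sem-5 | Information Security/Lect2/tempCodeRunnerFile.py | autoKeyGeneration
-- ===== SOURCE A (Python) =====
-- def autoKeyGeneration(key, input_message): # Generates key of the same length as the input message
--     key = list(key) # Convert key to list
--     if len(input_message) == len(key): # If the key is the same length as the input message, return the key as is
--         return "".join(key)
--     elif len(input_message) < len(key): # If the key is longer than the input message
--         return "".join(key[:len(input_message)]) # Return the key truncated to the length of the input message
--     else: # If the key is shorter than the input message
--         for i in range(len(input_message) - len(key)): # Append the key to itself until it is the same length as the input message
--             key.append(key[i % len(key)])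
--     return "".join(key)
-- ===== SOURCE B (Python) =====
-- def autoKeyGeneration(key, input_message):
--     n = len(input_message)
--     m = len(key)
--     return "".join(key[i % m] for i in range(n))
-- ===== Notes on version B (the rewrite author's own statement) =====
-- stated objective: simpler
-- what changed: Replaces A's three length-comparison branches and its growing-append loop (indexing into the list being extended) with a single uniform modulo-indexed pass over the fixed original key.
import Mathlib
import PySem

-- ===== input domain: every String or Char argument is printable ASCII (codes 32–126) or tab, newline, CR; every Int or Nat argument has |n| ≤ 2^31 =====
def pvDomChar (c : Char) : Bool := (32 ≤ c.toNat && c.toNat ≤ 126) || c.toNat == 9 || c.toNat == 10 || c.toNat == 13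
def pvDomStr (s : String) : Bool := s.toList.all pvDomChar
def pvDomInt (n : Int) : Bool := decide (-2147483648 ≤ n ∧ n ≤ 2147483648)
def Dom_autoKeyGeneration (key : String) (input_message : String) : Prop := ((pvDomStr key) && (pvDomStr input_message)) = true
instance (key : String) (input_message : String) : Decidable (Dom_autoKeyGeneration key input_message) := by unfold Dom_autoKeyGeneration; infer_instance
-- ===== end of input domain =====

-- B replaces A's three length branches and growing-append loop with one uniform modulo-indexed pass over the fixed key (objective: simpler).


-- ===== PORT A =====
-- key = list(key); three branches; else-branch loop appends key[i % len(key)] to the growing list.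
-- pyGetD's default ' ' is only reached where Python raises ZeroDivisionError (empty key), excluded by Pre_.
def autoKeyGeneration (key : String) (input_message : String) : String :=
  let k := key.toList
  if input_message.toList.length = k.length then
    String.ofList k
  else if input_message.toList.length < k.length then
    String.ofList (PySem.List.slice k none (some (input_message.toList.length : Int)))
  else
    let res := (PySem.List.pyRange 0 ((input_message.toList.length : Int) - (k.length : Int)) 1).foldl
      (fun kk i => kk ++ [PySem.List.pyGetD kk (PySem.Int.mod i (kk.length : Int)) ' ']) k
    String.ofList res

-- ===== PORT B =====
-- n = len(input_message); m = len(key); "".join(key[i % m] for i in range(n)).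
-- pyGetD's default ' ' is only reached where Python raises ZeroDivisionError (empty key), excluded by Pre_.
def autoKeyGeneration_alt (key : String) (input_message : String) : String :=
  let n := (input_message.toList.length : Int)
  let m := (key.toList.length : Int)
  String.ofList ((PySem.List.pyRange 0 n 1).map
    (fun i => PySem.List.pyGetD key.toList (PySem.Int.mod i m) ' '))

-- ===== PRECONDITION & SPEC =====
-- Pre_ excludes exactly the inputs where Python A raises ZeroDivisionError: empty key with non-empty message (B raises there too).
def Pre_autoKeyGeneration (key : String) (input_message : String) : Prop :=
  key.toList ≠ [] ∨ input_message.toList = []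
instance (key : String) (input_message : String) : Decidable (Pre_autoKeyGeneration key input_message) := by
  unfold Pre_autoKeyGeneration; infer_instance

def pvWitness_autoKeyGeneration : String × String := ("ab", "hello")

def Spec_autoKeyGeneration (key : String) (input_message : String) (out : String) : Prop := out = autoKeyGeneration_alt key input_message
instance (key : String) (input_message : String) (out : String) : Decidable (Spec_autoKeyGeneration key input_message out) := by unfold Spec_autoKeyGeneration; infer_instance

-- ===== CLAIM (what is proved, stated in full; the proofs are below) =====
def Claim_equal_autoKeyGeneration : Prop := ∀ (key : String) (input_message : String), Dom_autoKeyGeneration key input_message → Pre_autoKeyGeneration key input_message → Spec_autoKeyGeneration key input_message (autoKeyGeneration key input_message)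

-- ===== LEMMAS AND PROOFS =====

-- prefix of the modulo pass reproduces the key (i % m = i for i < m)
theorem pv_range_map_getD_take {k : List Char} (t : Nat) (ht : t ≤ k.length) :
    (List.range t).map (fun i => k.getD (i % k.length) ' ') = k.take t := by
  apply List.ext_getElem
  · simp [Nat.min_eq_left ht]
  · intro j h1 h2
    simp only [List.getElem_map, List.getElem_range, List.getElem_take]
    have hj : j < k.length := by simp at h1; omega
    rw [Nat.mod_eq_of_lt hj, List.getD_eq_getElem _ _ hj]

-- invariant of A's growing-append loop: after t steps the list is key ++ t modulo-indexed chars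
theorem pv_loop_invariant {k : List Char} (hm : k ≠ []) (t : Nat) :
    (PySem.List.pyRange 0 (t : Int) 1).foldl
      (fun kk i => kk ++ [PySem.List.pyGetD kk (PySem.Int.mod i (kk.length : Int)) ' ']) k
    = k ++ (List.range t).map (fun i => k.getD (i % k.length) ' ') := by
  have hm' : 0 < k.length := List.length_pos_iff.mpr hm
  induction t with
  | zero => simp
  | succ t ih =>
    have hcast : ((t : Int) + 1) = ((t + 1 : Nat) : Int) := by omega
    rw [← hcast, PySem.List.pyRange_one_succ_right (by positivity), List.foldl_append, ih]
    simp only [List.foldl_cons, List.foldl_nil]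
    set kk := k ++ (List.range t).map (fun i => k.getD (i % k.length) ' ') with hkk
    have hlen : kk.length = k.length + t := by simp [hkk]
    have hmod : PySem.Int.mod (t : Int) (kk.length : Int) = ((t % kk.length : Nat) : Int) :=
      PySem.Int.mod_natCast t kk.length
    have htlt : t < kk.length := by omega
    rw [hmod, Nat.mod_eq_of_lt htlt, PySem.List.pyGetD_natCast]
    have hget : kk.getD t ' ' = k.getD (t % k.length) ' ' := by
      rcases Nat.lt_or_ge t k.length with h | h
      · rw [Nat.mod_eq_of_lt h, hkk]
        rw [List.getD_eq_getElem _ _ (by simp; omega), List.getElem_append_left h,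
            List.getD_eq_getElem _ _ h]
      · rw [hkk, List.getD_eq_getElem _ _ (by simp; omega)]
        rw [List.getElem_append_right (by omega)]
        simp only [List.getElem_map, List.getElem_range]
        have hidx : (t - k.length) % k.length = t % k.length := (Nat.mod_eq_sub_mod h).symm
        rw [List.getD_eq_getElem _ _ (Nat.mod_lt _ hm')]
        simp only [hidx]
        exact (List.getD_eq_getElem _ _ (Nat.mod_lt _ hm')).symm
    rw [hget, List.range_succ, List.map_append, List.append_assoc]
    simp

-- B's pass, rewritten to Nat indices
theorem pv_alt_eq (key input_message : String) :
    autoKeyGeneration_alt key input_message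
    = String.ofList ((List.range input_message.toList.length).map
        (fun i => key.toList.getD (i % key.toList.length) ' ')) := by
  unfold autoKeyGeneration_alt
  dsimp only
  rw [PySem.List.pyRange_zero_nat]
  congr 1
  rw [List.map_map]
  apply List.map_congr_left
  intro i _
  simp only [Function.comp_apply]
  rw [PySem.Int.mod_natCast, PySem.List.pyGetD_natCast]

-- ===== VERDICT (by name: the statement is the Claim_ definition above) =====
theorem autoKeyGeneration_spec : Claim_equal_autoKeyGeneration := by
  intro key input_message _ hpre
  unfold Spec_autoKeyGeneration autoKeyGeneration
  rw [pv_alt_eq]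
  set k := key.toList with hk
  set n := input_message.toList.length with hn
  by_cases h1 : n = k.length
  · simp only [if_pos h1]
    rw [h1, pv_range_map_getD_take k.length le_rfl, List.take_length]
  · simp only [if_neg h1]
    by_cases h2 : n < k.length
    · simp only [if_pos h2]
      rw [PySem.List.slice_to_natCast, pv_range_map_getD_take n (le_of_lt h2)]
    · simp only [if_neg h2]
      have hm : k ≠ [] := by
        rcases hpre with h | h
        · exact h
        · exfalso; rw [← hk] at *; rw [h] at hn; simp at hn; omega
      have hcast : ((n : Int) - (k.length : Int)) = ((n - k.length : Nat) : Int) := by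
        omega
      rw [hcast, pv_loop_invariant hm]
      congr 1
      have hsplit : n = k.length + (n - k.length) := by omega
      rw [hsplit, List.range_add, List.map_append,
          pv_range_map_getD_take k.length le_rfl, List.take_length,
          Nat.add_sub_cancel_left]
      congr 1
      rw [List.map_map]
      apply List.map_congr_left
      intro i _
      simp [Nat.add_mod_left]
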